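-- pv_equiv track=rewrite | github.com/kaymmm/rhythmbox-playlist-generator | plgen.py | strListInStr
-- ===== SOURCE A (Python) =====
-- def strListInStr(compList, testStr):
--     # Function to determine whether or not any of the strings in a given list
--     # are contained within another string
--     # if an item in compList begins with an `!` character, the function returns
--     # false if testStr contains that string, even if it contains other items
--     # in compList
--     # if all of the items in compList begin with a `!` then return true if none
--     # of the items in compList are found in testStr
--     #  compList: list of strings to look for
--     #  testStr: string to search within
--     retVal = True
--     retSet = False
--     allBangs = True
--     for s in compList:
--         if s.startswith('!'):
--             s = s[1:]
--             bang = False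
--         else:
--             bang = True
--             allBangs = False
--         if testStr and s.lower() in testStr.lower():
--             retVal = bang is True and retVal
--             retSet = True
--     return retVal and (retSet or allBangs)
-- ===== SOURCE B (Python) =====
-- def strListInStr(compList, testStr):
--     # Partition-then-quantify: split into positive and negative (leading '!')
--     # patterns once, then decide with early-exit quantifiers.
--     positives = []
--     negatives = []
--     for s in compList:
--         if s.startswith('!'):
--             negatives.append(s[1:])
--         else:
--             positives.append(s)
--     low = testStr.lower()
--     def matches(s):
--         return bool(testStr) and s.lower() in low
--     if any(matches(s) for s in negatives):
--         return False
--     if any(matches(s) for s in positives):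
--         return True
--     return not positives
-- ===== Notes on version B (the rewrite author's own statement) =====
-- stated objective: faster
-- what changed: Replaces the single loop maintaining three boolean flags (retVal/retSet/allBangs) by a partition of the patterns into positives and negatives followed by two early-exit any() quantifiers and a final emptiness test; testStr.lower() is computed once instead of once per pattern.
import Mathlib
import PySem

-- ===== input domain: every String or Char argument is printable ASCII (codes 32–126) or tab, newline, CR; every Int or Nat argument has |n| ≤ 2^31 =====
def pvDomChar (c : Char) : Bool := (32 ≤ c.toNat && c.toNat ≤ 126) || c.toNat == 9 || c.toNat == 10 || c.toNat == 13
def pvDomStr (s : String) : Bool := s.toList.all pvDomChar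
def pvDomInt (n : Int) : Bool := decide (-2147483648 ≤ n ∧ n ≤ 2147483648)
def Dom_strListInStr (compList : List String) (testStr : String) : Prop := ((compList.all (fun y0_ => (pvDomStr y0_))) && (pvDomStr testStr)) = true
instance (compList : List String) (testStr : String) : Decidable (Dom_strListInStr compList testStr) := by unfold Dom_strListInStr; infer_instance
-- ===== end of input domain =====

-- B replaces A's one loop over three boolean flags by a partition into positive/negative
-- patterns followed by two early-exit quantifiers, lowering testStr once (objective: faster).

-- ===== PORT A =====
-- one iteration of A's loop; state = (retVal, retSet, allBangs)
def pvStepA (testStr : String) (st : Bool × Bool × Bool) (s0 : String) : Bool × Bool × Bool :=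
  let sb : String × Bool × Bool :=
    if PySem.Str.startswith s0 "!" then
      (PySem.Str.slice s0 (some 1) none, false, st.2.2)
    else
      (s0, true, false)
  if (!(testStr == "")) && PySem.Str.isIn (PySem.Str.lower sb.1) (PySem.Str.lower testStr) then
    (sb.2.1 && st.1, true, sb.2.2)
  else
    (st.1, st.2.1, sb.2.2)

def strListInStr (compList : List String) (testStr : String) : Bool :=
  let st := compList.foldl (pvStepA testStr) (true, false, true)
  st.1 && (st.2.1 || st.2.2)

-- ===== PORT B =====
def pvMatches (testStr : String) (low : String) (s : String) : Bool :=
  (!(testStr == "")) && PySem.Str.isIn (PySem.Str.lower s) low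

-- the partition loop: appends each item to positives or (stripped) to negatives
def pvStepB (pn : List String × List String) (s : String) : List String × List String :=
  if PySem.Str.startswith s "!" then
    (pn.1, pn.2 ++ [PySem.Str.slice s (some 1) none])
  else
    (pn.1 ++ [s], pn.2)

def strListInStr_alt (compList : List String) (testStr : String) : Bool :=
  let pn := compList.foldl pvStepB ([], [])
  let low := PySem.Str.lower testStr
  if pn.2.any (pvMatches testStr low) then false
  else if pn.1.any (pvMatches testStr low) then true
  else pn.1.isEmpty

-- ===== PRECONDITION & SPEC =====
def Spec_strListInStr (compList : List String) (testStr : String) (out : Bool) : Prop := out = strListInStr_alt compList testStr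
instance (compList : List String) (testStr : String) (out : Bool) : Decidable (Spec_strListInStr compList testStr out) := by unfold Spec_strListInStr; infer_instance

-- ===== CLAIM (what is proved, stated in full; the proofs are below) =====
def Claim_equal_strListInStr : Prop := ∀ (compList : List String) (testStr : String), Dom_strListInStr compList testStr → Spec_strListInStr compList testStr (strListInStr compList testStr)

-- ===== LEMMAS AND PROOFS =====

-- abbreviations used only by the proofs
def pvBang (s : String) : Bool := PySem.Str.startswith s "!"
def pvStrip (s : String) : String := PySem.Str.slice s (some 1) none
def pvM (testStr s : String) : Bool :=
  (!(testStr == "")) && PySem.Str.isIn (PySem.Str.lower s) (PySem.Str.lower testStr)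

-- one step of A's loop, in closed form
lemma stepA_eq (t : String) (st : Bool × Bool × Bool) (s : String) :
    pvStepA t st s =
      (st.1 && !(pvBang s && pvM t (pvStrip s)),
       st.2.1 || (if pvBang s then pvM t (pvStrip s) else pvM t s),
       st.2.2 && pvBang s) := by
  obtain ⟨v, r, a⟩ := st
  have hc1 : ∀ s0, PySem.Str.startswith s0 "!" = pvBang s0 := fun _ => rfl
  have hc2 : ∀ s0, ((!(t == "")) && PySem.Str.isIn (PySem.Str.lower s0) (PySem.Str.lower t)) = pvM t s0 :=
    fun _ => rfl
  have hc3 : PySem.Str.slice s (some 1) none = pvStrip s := rfl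
  simp only [pvStepA, hc1, hc3]
  cases hb : pvBang s
  · simp only [hb, Bool.false_eq_true, if_false]
    rw [hc2]
    cases hm : pvM t s <;> simp [hm]
  · simp only [if_true]
    rw [hc2]
    cases hm : pvM t (pvStrip s) <;> simp [hb, hm]

-- characterization of A's fold from an arbitrary state
lemma foldA_char (t : String) (l : List String) (v r a : Bool) :
    l.foldl (pvStepA t) (v, r, a) =
      (v && l.all (fun s => !(pvBang s && pvM t (pvStrip s))),
       r || l.any (fun s => if pvBang s then pvM t (pvStrip s) else pvM t s),
       a && l.all pvBang) := by
  induction l generalizing v r a with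
  | nil => simp
  | cons s tl ih =>
    simp only [List.foldl_cons, List.all_cons, List.any_cons, stepA_eq]
    rw [ih]
    simp [Bool.and_assoc, Bool.or_assoc]

-- characterization of B's partition fold
lemma foldB_char (l : List String) (p n : List String) :
    l.foldl pvStepB (p, n) =
      (p ++ l.filter (fun s => !pvBang s), n ++ (l.filter pvBang).map pvStrip) := by
  induction l generalizing p n with
  | nil => simp
  | cons s tl ih =>
    have hc1 : ∀ s0, PySem.Str.startswith s0 "!" = pvBang s0 := fun _ => rfl
    have hc3 : ∀ s0, PySem.Str.slice s0 (some 1) none = pvStrip s0 := fun _ => rfl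
    simp only [List.foldl_cons, pvStepB, hc1, hc3]
    cases hb : pvBang s <;> simp [hb, ih]

-- the list algebra used by the verdict proof
lemma anyNeg_eq (t : String) (l : List String) :
    ((l.filter pvBang).map pvStrip).any (pvM t)
      = l.any (fun s => pvBang s && pvM t (pvStrip s)) := by
  induction l with
  | nil => simp
  | cons s tl ih => cases hb : pvBang s <;> simp [hb, ih]

lemma anyPos_eq (t : String) (l : List String) :
    (l.filter (fun s => !pvBang s)).any (pvM t)
      = l.any (fun s => !pvBang s && pvM t s) := by
  induction l with
  | nil => simp
  | cons s tl ih => cases hb : pvBang s <;> simp [hb, ih]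

lemma emptyPos_eq (l : List String) :
    (l.filter (fun s => !pvBang s)).isEmpty = l.all pvBang := by
  induction l with
  | nil => simp
  | cons s tl ih => cases hb : pvBang s <;> simp [hb, ih]

lemma anyEff_split (t : String) (l : List String) :
    (l.any (fun s => if pvBang s then pvM t (pvStrip s) else pvM t s))
      = (l.any (fun s => pvBang s && pvM t (pvStrip s))
         || l.any (fun s => !pvBang s && pvM t s)) := by
  induction l with
  | nil => simp
  | cons s tl ih =>
    cases hb : pvBang s <;> simp [hb, ih, Bool.or_assoc, Bool.or_left_comm]

lemma allNotNeg_eq (t : String) (l : List String) :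
    l.all (fun s => !(pvBang s && pvM t (pvStrip s)))
      = !(l.any (fun s => pvBang s && pvM t (pvStrip s))) := by
  induction l with
  | nil => simp
  | cons s tl ih =>
    simp only [List.all_cons, List.any_cons, ih, Bool.not_or]

-- ===== VERDICT (by name: the statement is the Claim_ definition above) =====
theorem strListInStr_spec : Claim_equal_strListInStr := by
  intro l t _
  show strListInStr l t = strListInStr_alt l t
  unfold strListInStr strListInStr_alt
  rw [foldA_char, foldB_char]
  simp only [List.nil_append]
  have hmeq : pvMatches t (PySem.Str.lower t) = pvM t := rfl
  rw [hmeq, anyNeg_eq, anyPos_eq, emptyPos_eq, anyEff_split, allNotNeg_eq]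
  generalize l.any (fun s => pvBang s && pvM t (pvStrip s)) = A
  generalize l.any (fun s => !pvBang s && pvM t s) = P
  generalize l.all pvBang = E
  cases A <;> cases P <;> cases E <;> simp
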